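-- pv_equiv track=rewrite | github.com/pypi-data/pypi-mirror-396 | packages/cmstp/cmstp-1.1.0-py3-none-any.whl/cmstp/core/task_processor.py | check_allowed
-- ===== SOURCE A (Python) =====
-- from typing import Any, Dict, List, Optional, Tuple, Union
--
-- def check_allowed(
--     allowed_args: Optional[List[str]], args: Union[str, List[str]]
-- ) -> Tuple[List[str], bool]:
--     """
--     Check if an argument is in the allowed list.
--     If allowed_args is None, any argument is allowed.
--
--     :param allowed_args: List of allowed arguments or None if any argument is allowed
--     :type allowed_args: Optional[List[str]]
--     :param args: Argument or list of arguments to check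
--     :type args: Union[str, List[str]]
--     :return: Tuple of (list of wrong arguments, is valid)
--     :rtype: Tuple[List[str], bool]
--     """
--
--     def _check_single_allowed(allowed_args: List[str], arg: str) -> bool:
--         """
--         Check if a single argument is allowed, supporting wildcard '*'
--
--         :param allowed_args: List of allowed arguments
--         :type allowed_args: List[str]
--         :param arg: Argument to check
--         :type arg: str
--         :return: Whether the argument is allowed
--         :rtype: bool
--         """
--         for allowed in allowed_args:
--             if allowed.endswith("*"):
--                 if arg.startswith(allowed[:-1]):
--                     return True
--             elif arg == allowed:
--                 return True
--         return False
--
--     if allowed_args is None: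
--         return [], True
--     if isinstance(args, str):
--         is_allowed = _check_single_allowed(allowed_args, args)
--         wrong_args = [] if is_allowed else [args]
--         return wrong_args, is_allowed
--     else:  # List[str]
--         wrong_args = [
--             arg
--             for arg in args
--             if not _check_single_allowed(allowed_args, arg)
--         ]
--         return wrong_args, not wrong_args
-- ===== SOURCE B (Python) =====
-- def check_allowed(allowed_args, args):
--     if allowed_args is None:
--         return [], True
--     exact = set()
--     prefixes = set()
--     for a in allowed_args:
--         if a.endswith("*"):
--             prefixes.add(a[:-1])
--         else:
--             exact.add(a)
--     arg_list = [args] if isinstance(args, str) else args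
--     wrong_args = [
--         a for a in arg_list
--         if a not in exact
--         and not any(a[:i] in prefixes for i in range(len(a) + 1))
--     ]
--     return wrong_args, not wrong_args
-- ===== Notes on version B (the rewrite author's own statement) =====
-- stated objective: faster
-- what changed: B inverts the wildcard test: instead of scanning the allowed-pattern list for each argument, it builds two hash sets (exact entries, wildcard prefixes) in one pass and then tests each argument by membership of the argument itself and of each of its own prefixes in those sets, so no loop over the allowed list remains in the per-argument check.
import Mathlib
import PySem

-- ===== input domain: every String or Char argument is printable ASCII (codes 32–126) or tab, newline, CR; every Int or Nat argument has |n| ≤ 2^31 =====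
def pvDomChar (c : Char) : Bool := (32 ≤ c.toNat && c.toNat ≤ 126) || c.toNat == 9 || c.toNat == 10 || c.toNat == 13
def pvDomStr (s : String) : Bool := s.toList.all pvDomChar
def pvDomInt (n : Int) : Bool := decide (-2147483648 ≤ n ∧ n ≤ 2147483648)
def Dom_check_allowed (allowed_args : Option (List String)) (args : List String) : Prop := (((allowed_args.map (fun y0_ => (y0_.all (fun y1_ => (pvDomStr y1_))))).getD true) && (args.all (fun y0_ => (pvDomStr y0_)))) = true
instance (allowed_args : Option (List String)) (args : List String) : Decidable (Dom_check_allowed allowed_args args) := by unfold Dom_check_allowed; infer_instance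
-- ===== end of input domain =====

-- B inverts A's wildcard test: one pass splits the allowed list into a set of exact entries and a set
-- of wildcard prefixes, and each argument is then checked by looking up the argument and each of its
-- own prefixes in those sets — no per-argument scan of the allowed list remains (a constant-factor change).
-- Under the type convention args is List String, so A's isinstance(args, str) branch is the list branch.

-- ===== PORT A =====
-- A's inner helper _check_single_allowed: scan the allowed list in order.
def pvCheckSingleA (allowed_args : List String) (arg : String) : Bool :=
  match allowed_args with
  | [] => false
  | allowed :: rest =>
    if PySem.Str.endswith allowed "*" then
      if PySem.Str.startswith arg (PySem.Str.slice allowed none (some (-1))) then true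
      else pvCheckSingleA rest arg
    else if arg == allowed then true
    else pvCheckSingleA rest arg

def check_allowed (allowed_args : Option (List String)) (args : List String) : List String × Bool :=
  match allowed_args with
  | none => ([], true)
  | some allowed =>
    let wrong_args := args.filter (fun arg => ! pvCheckSingleA allowed arg)
    (wrong_args, wrong_args.isEmpty)

-- ===== PORT B =====
-- B's single pass over the allowed list: a set of exact entries and a set of wildcard prefixes.
def pvBuildB (allowed_args : List String) : PySem.Set String × PySem.Set String :=
  allowed_args.foldl
    (fun acc a =>
      if PySem.Str.endswith a "*" then
        (acc.1, PySem.Set.add acc.2 (PySem.Str.slice a none (some (-1))))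
      else (PySem.Set.add acc.1 a, acc.2))
    (PySem.Set.empty, PySem.Set.empty)

-- per-argument test: 'a in exact or any(a[:i] in prefixes for i in range(len(a)+1))'
def pvTestB (ep : PySem.Set String × PySem.Set String) (a : String) : Bool :=
  PySem.Set.contains ep.1 a ||
    (PySem.List.pyRange 0 (PySem.Str.len a + 1) 1).any
      (fun i => PySem.Set.contains ep.2 (PySem.Str.slice a none (some i)))

def check_allowed_alt (allowed_args : Option (List String)) (args : List String) : List String × Bool :=
  match allowed_args with
  | none => ([], true)
  | some allowed =>
    let ep := pvBuildB allowed
    let wrong_args := args.filter (fun a => ! pvTestB ep a)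
    (wrong_args, wrong_args.isEmpty)

-- ===== PRECONDITION & SPEC =====
def Spec_check_allowed (allowed_args : Option (List String)) (args : List String) (out : List String × Bool) : Prop := out = check_allowed_alt allowed_args args
instance (allowed_args : Option (List String)) (args : List String) (out : List String × Bool) : Decidable (Spec_check_allowed allowed_args args out) := by unfold Spec_check_allowed; infer_instance

-- ===== CLAIM (what is proved, stated in full; the proofs are below) =====
def Claim_equal_check_allowed : Prop := ∀ (allowed_args : Option (List String)) (args : List String), Dom_check_allowed allowed_args args → Spec_check_allowed allowed_args args (check_allowed allowed_args args)

-- ===== LEMMAS AND PROOFS =====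

-- Membership test after Set.add, at the Bool (contains) level.
theorem pvContains_add (s : PySem.Set String) (x y : String) :
    (PySem.Set.add s x).contains y = (s.contains y || (y == x)) := by
  simp only [PySem.Set.add]
  split_ifs with h <;> by_cases hyx : y = x <;>
    simp_all [List.contains_eq_mem, List.mem_append]

-- any distributes over || .
theorem pvAny_or {α : Type} (l : List α) (f g : α → Bool) :
    (l.any fun x => f x || g x) = (l.any f || l.any g) := by
  induction l with
  | nil => rfl
  | cons a t ih =>
    simp only [List.any_cons, ih]
    cases f a <;> cases g a <;> cases t.any f <;> cases t.any g <;> rfl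

-- Enumerating the prefixes of a and comparing each with p is the same as startswith a p.
theorem pvAnyPrefix_eq (a p : String) :
    ((PySem.List.pyRange 0 (PySem.Str.len a + 1) 1).any
      (fun i => PySem.Str.slice a none (some i) == p)) = PySem.Str.startswith a p := by
  have hslice : ∀ k : Nat, (PySem.Str.slice a none (some (k : Int))).toList = a.toList.take k := by
    intro k; simp [PySem.List.slice_to_natCast]
  have hcast : PySem.Str.len a + 1 = ((a.toList.length + 1 : Nat) : Int) := by
    simp [PySem.Str.len_eq]
  rw [hcast, PySem.List.pyRange_one]
  rw [Bool.eq_iff_iff]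
  simp only [List.any_eq_true, List.mem_map, List.mem_range, beq_iff_eq, zero_add,
    sub_zero, Int.toNat_natCast, PySem.Str.startswith_eq, PySem.Chars.startswith_iff]
  constructor
  · rintro ⟨i, ⟨k, hk, rfl⟩, hs⟩
    have h2 := hslice k
    rw [hs] at h2
    exact h2 ▸ List.take_prefix k a.toList
  · intro hpre
    refine ⟨(p.toList.length : Int), ⟨p.toList.length, ?_, rfl⟩, ?_⟩
    · have := List.IsPrefix.length_le hpre
      omega
    · apply String.ext
      rw [hslice p.toList.length]
      exact (List.prefix_iff_eq_take.mp hpre).symm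

-- Invariant of B's building fold: the accumulated test equals the test on the accumulator so far
-- or A's sequential scan of the remaining allowed entries.
theorem pvBuild_invariant (allowed : List String) (arg : String) :
    ∀ acc : PySem.Set String × PySem.Set String,
      pvTestB (allowed.foldl
          (fun acc a =>
            if PySem.Str.endswith a "*" then
              (acc.1, PySem.Set.add acc.2 (PySem.Str.slice a none (some (-1))))
            else (PySem.Set.add acc.1 a, acc.2)) acc) arg
      = (pvTestB acc arg || pvCheckSingleA allowed arg) := by
  induction allowed with
  | nil => intro acc; simp [pvCheckSingleA]
  | cons a rest ih =>
    intro acc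
    cases he : PySem.Str.endswith a "*"
    · specialize ih (PySem.Set.add acc.1 a, acc.2)
      simp only [List.foldl_cons, he, Bool.false_eq_true, if_false, pvCheckSingleA] at ih ⊢
      rw [ih]
      simp only [pvTestB, pvContains_add]
      generalize acc.1.contains arg = A
      generalize ((PySem.List.pyRange 0 (PySem.Str.len arg + 1) 1).any
        (fun i => PySem.Set.contains acc.2 (PySem.Str.slice arg none (some i)))) = B
      generalize (arg == a) = q
      generalize pvCheckSingleA rest arg = R
      cases A <;> cases B <;> cases q <;> cases R <;> rfl
    · specialize ih (acc.1, PySem.Set.add acc.2 (PySem.Str.slice a none (some (-1))))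
      simp only [List.foldl_cons, he, if_true, pvCheckSingleA] at ih ⊢
      rw [ih]
      simp only [pvTestB, pvContains_add, pvAny_or, pvAnyPrefix_eq]
      generalize acc.1.contains arg = A
      generalize ((PySem.List.pyRange 0 (PySem.Str.len arg + 1) 1).any
        (fun i => PySem.Set.contains acc.2 (PySem.Str.slice arg none (some i)))) = B
      generalize PySem.Str.startswith arg (PySem.Str.slice a none (some (-1))) = S
      generalize pvCheckSingleA rest arg = R
      cases A <;> cases B <;> cases S <;> cases R <;> rfl

-- Pointwise: B's membership test equals A's sequential scan.
theorem pvAny_false {α : Type} (l : List α) : (l.any fun _ => false) = false := by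
  induction l <;> simp_all

theorem pvTest_eq (allowed : List String) (arg : String) :
    pvTestB (pvBuildB allowed) arg = pvCheckSingleA allowed arg := by
  have h := pvBuild_invariant allowed arg (PySem.Set.empty, PySem.Set.empty)
  simpa [pvBuildB, pvTestB, PySem.Set.empty, PySem.Set.contains, pvAny_false] using h

-- ===== VERDICT (by name: the statement is the Claim_ definition above) =====
theorem check_allowed_spec : Claim_equal_check_allowed := by
  intro allowed_args args _
  unfold Spec_check_allowed check_allowed check_allowed_alt
  cases allowed_args with
  | none => rfl
  | some allowed =>
    simp only
    have : (fun a => ! pvTestB (pvBuildB allowed) a)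
        = (fun a => ! pvCheckSingleA allowed a) := by
      funext a; rw [pvTest_eq]
    rw [this]
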